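-- pv_equiv track=rewrite | github.com/SriramKrishnan8/scl_sandhi_interface | sandhi/sandhi_words.py | natva_inhibited
-- ===== SOURCE A (Python) =====
-- natva_inhibiting_letters = "cCjJFtTdDNwWxXnlsS"
--
-- def natva_inhibited(aft_r):
--     index_n = aft_r.find("n")
--     if (index_n == (len(aft_r) - 1)):
--         return (True, index_n)
--     if index_n == -1:
--         return (False, index_n)
--     bef_n = aft_r[:index_n]
--     bef_n_status = [False]
--     bef_n_status = [True for (i,v) in enumerate(bef_n) if (v in natva_inhibiting_letters)]
--     status = True if (True in bef_n_status) else False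
--     return (status, index_n)
-- ===== SOURCE B (Python) =====
-- natva_inhibiting_letters = "cCjJFtTdDNwWxXnlsS"
--
-- def natva_inhibited(aft_r):
--     status = False
--     last = len(aft_r) - 1
--     for i, v in enumerate(aft_r):
--         if v == "n":
--             return (True, i) if i == last else (status, i)
--         if v in natva_inhibiting_letters:
--             status = True
--     return (False, -1)
-- ===== Notes on version B (the rewrite author's own statement) =====
-- stated objective: simpler
-- what changed: Replaced find + slice + enumerate-comprehension + membership test with one short-circuit pass that accumulates the inhibiting-letter flag and returns at the first occurrence of the letter n.
-- intended difference: On the empty string A returns (True, -1) only because the -1 not-found sentinel of find accidentally equals len minus one; B returns (False, -1), the intended answer when the letter n is absent. — e.g. on natva_inhibited(""): A returns (true, -1), B returns (false, -1)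
import Mathlib
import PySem

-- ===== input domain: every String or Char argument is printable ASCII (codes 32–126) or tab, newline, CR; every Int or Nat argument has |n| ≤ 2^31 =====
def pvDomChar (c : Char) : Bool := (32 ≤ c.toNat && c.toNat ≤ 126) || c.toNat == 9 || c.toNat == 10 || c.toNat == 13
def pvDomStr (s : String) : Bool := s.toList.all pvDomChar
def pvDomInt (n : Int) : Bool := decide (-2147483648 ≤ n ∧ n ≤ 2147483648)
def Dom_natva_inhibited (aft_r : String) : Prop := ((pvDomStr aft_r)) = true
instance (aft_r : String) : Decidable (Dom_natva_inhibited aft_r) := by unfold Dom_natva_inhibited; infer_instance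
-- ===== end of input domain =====

-- B replaces find + slice + comprehension with one short-circuit pass over enumerate; on the empty string B returns (false,-1) where A's -1 sentinel accidentally yields (true,-1) (see D_).


def natva_inhibiting_letters : String := "cCjJFtTdDNwWxXnlsS"

-- ===== PORT A =====
def natva_inhibited (aft_r : String) : Bool × Int :=
  let index_n := PySem.Str.find aft_r "n"
  if index_n = (PySem.Str.len aft_r : Int) - 1 then (true, index_n)
  else if index_n = -1 then (false, index_n)
  else
    let bef_n := PySem.List.slice aft_r.toList none (some index_n)
    let bef_n_status := ((PySem.List.enumerate bef_n).filter
        (fun iv => PySem.Chars.isIn [iv.2] natva_inhibiting_letters.toList)).map (fun _ => true)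
    let status := if true ∈ bef_n_status then true else false
    (status, index_n)

-- ===== PORT B =====
-- B's loop over enumerate(aft_r): i = current index, last = len-1, status = inhibiting letter seen so far
def natvaAltLoop (cs : List Char) (i : Nat) (last : Int) (status : Bool) : Bool × Int :=
  match cs with
  | [] => (false, -1)
  | v :: rest =>
      if v = 'n' then (if (i : Int) = last then (true, (i : Int)) else (status, (i : Int)))
      else natvaAltLoop rest (i + 1) last
        (if PySem.Chars.isIn [v] natva_inhibiting_letters.toList then true else status)

def natva_inhibited_alt (aft_r : String) : Bool × Int :=
  natvaAltLoop aft_r.toList 0 ((PySem.Str.len aft_r : Int) - 1) false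

-- ===== PRECONDITION & SPEC =====
-- On the empty string A returns (true, -1) only because the -1 not-found sentinel of find
-- accidentally equals len minus one; B returns (false, -1), the intended answer when the letter n is absent.
def D_natva_inhibited (aft_r : String) : Prop := aft_r = ""
instance (aft_r : String) : Decidable (D_natva_inhibited aft_r) := by unfold D_natva_inhibited; infer_instance

def Spec_natva_inhibited (aft_r : String) (out : Bool × Int) : Prop := ¬ D_natva_inhibited aft_r → out = natva_inhibited_alt aft_r
instance (aft_r : String) (out : Bool × Int) : Decidable (Spec_natva_inhibited aft_r out) := by unfold Spec_natva_inhibited; infer_instance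

def pvDiffWitness_natva_inhibited : String := ""
def pvDiffWitnessOut_natva_inhibited : (Bool × Int) × (Bool × Int) := ((true, -1), (false, -1))

-- ===== CLAIM (what is proved, stated in full; the proofs are below) =====
def Claim_unchanged_natva_inhibited : Prop := ∀ (aft_r : String), Dom_natva_inhibited aft_r → Spec_natva_inhibited aft_r (natva_inhibited aft_r)
def Claim_changed_natva_inhibited : Prop := Dom_natva_inhibited (pvDiffWitness_natva_inhibited) ∧ D_natva_inhibited (pvDiffWitness_natva_inhibited) ∧ natva_inhibited (pvDiffWitness_natva_inhibited) = pvDiffWitnessOut_natva_inhibited.1 ∧ natva_inhibited_alt (pvDiffWitness_natva_inhibited) = pvDiffWitnessOut_natva_inhibited.2 ∧ pvDiffWitnessOut_natva_inhibited.1 ≠ pvDiffWitnessOut_natva_inhibited.2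
def Claim_exact_natva_inhibited : Prop := ∀ (aft_r : String), Dom_natva_inhibited aft_r → D_natva_inhibited aft_r → natva_inhibited aft_r ≠ natva_inhibited_alt aft_r

-- ===== LEMMAS AND PROOFS =====

theorem natva_singleton_prefix {c : Char} {l : List Char} : [c] <+: l ↔ l.head? = some c := by
  cases l with
  | nil => simp
  | cons a t => simp [List.cons_prefix_cons, eq_comm]

theorem natva_find_single (cs : List Char) :
    PySem.Chars.find cs ['n'] =
      match cs.findIdx? (· = 'n') with
      | none => -1
      | some j => (j : Int) := by
  cases h : cs.findIdx? (· = 'n') with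
  | none =>
      rw [List.findIdx?_eq_none_iff] at h
      have hni : ¬ ['n'] <:+: cs := by
        rw [List.singleton_infix_iff]
        intro hm
        simpa using h _ hm
      simpa using (PySem.Chars.find_eq_neg_one_iff (s := cs) (sub := ['n'])).mpr hni
  | some j =>
      obtain ⟨hj, hpj, hmin⟩ := List.findIdx?_eq_some_iff_getElem.mp h
      have hpj' : cs[j] = 'n' := by simpa using hpj
      have hinf : ['n'] <:+: cs := by
        rw [List.singleton_infix_iff]
        exact hpj' ▸ List.getElem_mem hj
      have hnn : 0 ≤ PySem.Chars.find cs ['n'] :=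
        (PySem.Chars.find_nonneg_iff (s := cs) (sub := ['n'])).mpr hinf
      obtain ⟨hpre, hlt⟩ := PySem.Chars.find_spec (s := cs) (sub := ['n']) hnn
      have hk : cs[(PySem.Chars.find cs ['n']).toNat]? = some 'n' := by
        rw [← List.head?_drop]
        exact natva_singleton_prefix.mp hpre
      have hkj : (PySem.Chars.find cs ['n']).toNat = j := by
        by_contra hne
        rcases Nat.lt_or_ge (PySem.Chars.find cs ['n']).toNat j with hlt' | hge
        · have := hmin _ hlt'
          have : cs[(PySem.Chars.find cs ['n']).toNat] = 'n' := by
            have hlen : (PySem.Chars.find cs ['n']).toNat < cs.length := by omega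
            simpa [List.getElem?_eq_getElem hlen] using hk
          simp [this] at *
        · have hjk : j < (PySem.Chars.find cs ['n']).toNat := by omega
          apply hlt j hjk
          rw [natva_singleton_prefix, List.head?_drop]
          simp [List.getElem?_eq_getElem hj, hpj']
      simp only []
      omega

theorem natva_loop_spec (cs : List Char) : ∀ (i : Nat) (last : Int) (status : Bool),
    natvaAltLoop cs i last status =
      match cs.findIdx? (· = 'n') with
      | none => (false, -1)
      | some j => if ((i + j : Nat) : Int) = last then (true, ((i + j : Nat) : Int))
                  else (status || (cs.take j).any
                        (fun c => PySem.Chars.isIn [c] natva_inhibiting_letters.toList),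
                        ((i + j : Nat) : Int)) := by
  induction cs with
  | nil => intro i last status; simp [natvaAltLoop]
  | cons v rest ih =>
      intro i last status
      by_cases hv : v = 'n'
      · subst hv
        simp [natvaAltLoop, List.findIdx?_cons]
      · rw [natvaAltLoop]
        simp only [List.findIdx?_cons, hv, decide_eq_true_eq, if_false]
        rw [ih]
        cases h : rest.findIdx? (· = 'n') with
        | none => simp
        | some j =>
            have harith : ((i + 1 + j : Nat) : Int) = ((i + (j + 1) : Nat) : Int) := by push_cast; ring
            simp only [Option.map_some, harith]
            by_cases hl : ((i + (j + 1) : Nat) : Int) = last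
            · simp [hl]
            · simp only [hl, if_false, List.take_succ_cons, List.any_cons]
              cases hf : PySem.Chars.isIn [v] natva_inhibiting_letters.toList <;>
                cases status <;> simp

theorem natva_filter_enumerate {α : Type} (f : α → Bool) :
    ∀ (l : List α) (s : Int),
      ((PySem.List.enumerate l s).filter (fun iv => f iv.2) = []) ↔ l.any f = false := by
  intro l
  induction l with
  | nil => intro s; simp [PySem.List.enumerate_nil]
  | cons a t ih =>
      intro s
      rw [PySem.List.enumerate_cons]
      cases hf : f a <;> simp [hf, ih]


-- ===== VERDICT (by name: the statement is the Claim_ definition above) =====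
theorem natva_inhibited_spec : Claim_unchanged_natva_inhibited := by
  intro s _ hD
  have hs : s.toList ≠ [] := by
    intro h
    exact hD (String.toList_eq_nil_iff.mp h)
  have hlen : 0 < s.toList.length := List.length_pos_iff.mpr hs
  show natva_inhibited s = natva_inhibited_alt s
  unfold natva_inhibited natva_inhibited_alt
  rw [natva_loop_spec]
  have hfind : PySem.Str.find s "n" = PySem.Chars.find s.toList ['n'] := by
    simp [PySem.Str.find_eq]
  rw [hfind, natva_find_single]
  cases h : s.toList.findIdx? (· = 'n') with
  | none =>
      have hlen2 : 0 < s.length := by simpa using hlen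
      have h1 : ¬ (-1 : Int) = (s.length : Int) - 1 := by omega
      simp [h1]
  | some j =>
      have hj : j < s.toList.length := (List.findIdx?_eq_some_iff_getElem.mp h).1
      by_cases hlast : ((j : Nat) : Int) = (PySem.Str.len s : Int) - 1
      · simp [hlast]
      · have hne1 : ((j : Nat) : Int) ≠ -1 := by omega
        simp only [hlast, if_false, hne1, Nat.zero_add]
        have hslice : PySem.List.slice s.toList none (some ((j : Nat) : Int)) = s.toList.take j :=
          PySem.List.slice_to_natCast s.toList j
        rw [hslice]
        cases hany : (s.toList.take j).any
            (fun c => PySem.Chars.isIn [c] natva_inhibiting_letters.toList) with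
        | false =>
            have := (natva_filter_enumerate
              (fun c => PySem.Chars.isIn [c] natva_inhibiting_letters.toList)
              (s.toList.take j) 0).mpr hany
            simp [this]
        | true =>
            have hne := (natva_filter_enumerate
              (fun c => PySem.Chars.isIn [c] natva_inhibiting_letters.toList)
              (s.toList.take j) 0)
            have : ((PySem.List.enumerate (s.toList.take j) 0).filter
                (fun iv => PySem.Chars.isIn [iv.2] natva_inhibiting_letters.toList)) ≠ [] := by
              intro hnil
              rw [hne.mp hnil] at hany
              cases hany
            rcases List.exists_mem_of_ne_nil _ this with ⟨x, hx⟩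
            obtain ⟨hx1, hx2⟩ := List.mem_filter.mp hx
            simp
            exact ⟨x.1, x.2, by simpa using hx1, hx2⟩

theorem natva_inhibited_changed : Claim_changed_natva_inhibited := by
  unfold Claim_changed_natva_inhibited; decide

theorem natva_inhibited_tight : Claim_exact_natva_inhibited := by
  intro aft_r _ hD
  unfold D_natva_inhibited at hD
  subst hD; decide
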